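-- pv_equiv track=rewrite | github.com/calvinpelletier/ai_saas | ai/cna.py | _shift_coords
-- ===== SOURCE A (Python) =====
-- def _shift_coords(coords, offset):
--     dx, dy = offset
--     shifted_coords = []
--     for i, val in enumerate(coords):
--         if i % 2:
--             shifted = coords[i] + dy
--         else:
--             shifted = coords[i] + dx
--         shifted_coords.append(shifted)
--     return shifted_coords
-- ===== SOURCE B (Python) =====
-- def _shift_coords(coords, offset):
--     dx, dy = offset
--     xs = [c + dx for c in coords[0::2]]
--     ys = [c + dy for c in coords[1::2]]
--     out = []
--     for x, y in zip(xs, ys):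
--         out.append(x)
--         out.append(y)
--     if len(ys) < len(xs):
--         out.append(xs[-1])
--     return out
-- ===== Notes on version B (the rewrite author's own statement) =====
-- stated objective: alternative
-- what changed: Instead of one indexed loop branching on i % 2, B splits coords into its even- and odd-index slices, adds dx resp. dy uniformly to each, and interleaves the two lists back, preserving a trailing even-slice element for odd lengths.
import Mathlib
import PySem

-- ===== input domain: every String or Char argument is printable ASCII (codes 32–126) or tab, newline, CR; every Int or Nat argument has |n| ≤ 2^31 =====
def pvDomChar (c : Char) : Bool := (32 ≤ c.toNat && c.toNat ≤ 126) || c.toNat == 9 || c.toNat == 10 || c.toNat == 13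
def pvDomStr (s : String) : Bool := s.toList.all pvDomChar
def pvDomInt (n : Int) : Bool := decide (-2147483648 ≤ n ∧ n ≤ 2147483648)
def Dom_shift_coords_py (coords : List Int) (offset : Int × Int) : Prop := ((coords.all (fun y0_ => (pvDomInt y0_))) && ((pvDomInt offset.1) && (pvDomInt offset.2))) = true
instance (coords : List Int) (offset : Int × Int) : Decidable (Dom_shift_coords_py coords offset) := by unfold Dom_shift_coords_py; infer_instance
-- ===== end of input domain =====

-- B replaces the indexed parity-branching loop by slice-add-zip-merge (alternative decomposition, same cost).

-- ===== PORT A =====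
-- literal port: for i, val in enumerate(coords) … coords[i] is exactly the enumerated element val
def shift_coords_py (coords : List Int) (offset : Int × Int) : List Int :=
  let dx := offset.1
  let dy := offset.2
  (PySem.List.enumerate coords 0).foldl
    (fun acc p => acc ++ [if p.1 % 2 ≠ 0 then p.2 + dy else p.2 + dx]) []

-- ===== PORT B =====
-- hand port of the step-2 slice s[0::2] (PySem.List.slice covers only step 1); exact: every other element from index 0
def pvEvens : List Int → List Int
  | [] => []
  | x :: rest => x :: pvEvens (rest.drop 1)
  termination_by s => s.length
  decreasing_by simp

-- Source B's zip loop plus the trailing-element append (xs[-1] on a list known nonempty = getLast!)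
def pvZipMerge (xs ys : List Int) : List Int :=
  let out := (xs.zip ys).foldl (fun acc p => acc ++ [p.1, p.2]) []
  if ys.length < xs.length then out ++ [xs.getLast!] else out

def shift_coords_py_alt (coords : List Int) (offset : Int × Int) : List Int :=
  let dx := offset.1
  let dy := offset.2
  let xs := (pvEvens coords).map (· + dx)               -- coords[0::2], each + dx
  let ys := (pvEvens (coords.drop 1)).map (· + dy)      -- coords[1::2], each + dy
  pvZipMerge xs ys

-- ===== PRECONDITION & SPEC =====
def Spec_shift_coords_py (coords : List Int) (offset : Int × Int) (out : List Int) : Prop := out = shift_coords_py_alt coords offset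
instance (coords : List Int) (offset : Int × Int) (out : List Int) : Decidable (Spec_shift_coords_py coords offset out) := by unfold Spec_shift_coords_py; infer_instance

-- ===== CLAIM (what is proved, stated in full; the proofs are below) =====
def Claim_equal_shift_coords_py : Prop := ∀ (coords : List Int) (offset : Int × Int), Dom_shift_coords_py coords offset → Spec_shift_coords_py coords offset (shift_coords_py coords offset)

-- ===== LEMMAS AND PROOFS =====
-- the loop of A, reduced to a map over the enumeration
theorem pvFoldlAppend (f : Int × Int → Int) (l : List (Int × Int)) (acc : List Int) :
    l.foldl (fun acc p => acc ++ [f p]) acc = acc ++ l.map f := by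
  induction l generalizing acc with
  | nil => simp
  | cons p t ih => simp [List.foldl, ih]

-- reference interleaving: take from xs and ys alternately, roles swapping each step
def pvInterleave : List Int → List Int → List Int
  | [], ys => ys
  | x :: xs, ys => x :: pvInterleave ys xs
  termination_by xs ys => xs.length + ys.length
  decreasing_by simp; omega

theorem pvMain (dx dy : Int) (coords : List Int) (s : Int) (hs : s % 2 = 0) :
    (PySem.List.enumerate coords s).map (fun p => if p.1 % 2 ≠ 0 then p.2 + dy else p.2 + dx)
      = pvInterleave ((pvEvens coords).map (· + dx)) ((pvEvens (coords.drop 1)).map (· + dy)) := by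
  induction coords using pvEvens.induct generalizing s with
  | case1 => simp [PySem.List.enumerate_nil, pvEvens, pvInterleave]
  | case2 x rest ih =>
    cases rest with
    | nil =>
      simp [PySem.List.enumerate_cons, PySem.List.enumerate_nil, pvEvens, pvInterleave]
      omega
    | cons y rest' =>
      have h1 : ¬ s % 2 ≠ 0 := by omega
      have h2 : (s + 1) % 2 ≠ 0 := by omega
      have h3 : (s + 1 + 1) % 2 = 0 := by omega
      simp only [PySem.List.enumerate_cons, List.map_cons, List.drop_one, List.drop_succ_cons,
        List.drop_zero] at *
      rw [ih (s + 1 + 1) h3]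
      simp [pvEvens, pvInterleave, h1, h2]

theorem pvGetLastBangCons (x : Int) (xs : List Int) (h : xs ≠ []) :
    (x :: xs).getLast! = xs.getLast! := by
  cases xs with
  | nil => exact absurd rfl h
  | cons b t => simp [List.getLast!, List.getLast]

theorem pvFoldl2Append (l : List (Int × Int)) (acc : List Int) :
    l.foldl (fun acc p => acc ++ [p.1, p.2]) acc
      = acc ++ l.foldl (fun acc p => acc ++ [p.1, p.2]) [] := by
  induction l generalizing acc with
  | nil => simp
  | cons p t ih =>
    rw [List.foldl_cons, List.foldl_cons, ih (acc ++ [p.1, p.2]), ih ([] ++ [p.1, p.2])]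
    simp

theorem pvZipMerge_cons (x y : Int) (xs ys : List Int) :
    pvZipMerge (x :: xs) (y :: ys) = x :: y :: pvZipMerge xs ys := by
  unfold pvZipMerge
  simp only [List.zip_cons_cons, List.foldl_cons, List.nil_append, List.length_cons]
  rw [pvFoldl2Append]
  by_cases h : ys.length < xs.length
  · have hxs : xs ≠ [] := by intro he; subst he; simp at h
    rw [if_pos (by omega), if_pos h, pvGetLastBangCons x xs hxs]
    simp
  · rw [if_neg (by omega), if_neg h]
    simp

theorem pvZipMerge_eq_interleave (xs ys : List Int)
    (h1 : ys.length ≤ xs.length) (h2 : xs.length ≤ ys.length + 1) :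
    pvZipMerge xs ys = pvInterleave xs ys := by
  induction xs generalizing ys with
  | nil =>
    have : ys = [] := by cases ys with | nil => rfl | cons a t => simp at h1
    subst this
    simp [pvZipMerge, pvInterleave]
  | cons x xs ih =>
    cases ys with
    | nil =>
      have : xs = [] := by cases xs with | nil => rfl | cons a t => simp at h2
      subst this
      simp [pvZipMerge, pvInterleave, List.getLast!, List.getLast]
    | cons y ys =>
      have l1 : ys.length ≤ xs.length := by simp [List.length_cons] at h1; omega
      have l2 : xs.length ≤ ys.length + 1 := by simp [List.length_cons] at h2; omega
      rw [pvZipMerge_cons, ih ys l1 l2]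
      simp [pvInterleave]

theorem pvEvensLength (l : List Int) : (pvEvens l).length = (l.length + 1) / 2 := by
  induction l using pvEvens.induct with
  | case1 => simp [pvEvens]
  | case2 x rest ih =>
    simp only [pvEvens, List.length_cons, List.drop_one] at ih ⊢
    rw [ih]
    simp [List.length_tail]
    omega

-- ===== VERDICT (by name: the statement is the Claim_ definition above) =====
theorem shift_coords_py_spec : Claim_equal_shift_coords_py := by
  intro coords offset _
  unfold Spec_shift_coords_py shift_coords_py shift_coords_py_alt
  simp only []
  rw [pvFoldlAppend, pvZipMerge_eq_interleave]
  · simpa using pvMain offset.1 offset.2 coords 0 (by decide)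
  · simp [pvEvensLength]; omega
  · simp [pvEvensLength]; omega
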